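-- pv_equiv track=rewrite | github.com/ramalho/vocab | vocab.py | extrair
-- ===== SOURCE A (Python) =====
-- def extrair(html) -> (list, bool):
--     """extrair lista de vocábulos do html, e indicador de continuação"""
--     if 'Nenhuma palavra encontrada' in html:
--         return ([], False)
--     continua = 'Sua pesquisa retornou mais de 200 linhas' in html
--
--     texto = html.split('<p>')
--     lista = []
--     for lin in texto:
--         lin = lin.replace('</p>', '')
--         lin = lin.strip()
--         if not lin:
--             continue
--         if lin.startswith('<'):
--             if not continua:  # tag inesperado
--                 raise SystemExit()
--         else:
--             lista.append(lin)
--     return (lista, continua)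
-- ===== SOURCE B (Python) =====
-- def extrair(html) -> (list, bool):
--     """extrair lista de vocábulos do html, e indicador de continuação"""
--     if 'Nenhuma palavra encontrada' in html:
--         return ([], False)
--     continua = 'Sua pesquisa retornou mais de 200 linhas' in html
--     lista = []
--     resto = html
--     while True:
--         i = resto.find('<p>')
--         lin = (resto if i < 0 else resto[:i]).replace('</p>', '').strip()
--         if lin:
--             if lin.startswith('<'):
--                 if not continua:  # tag inesperado
--                     raise SystemExit()
--             else:
--                 lista.append(lin)
--         if i < 0:
--             return (lista, continua)
--         resto = resto[i+3:]
-- ===== Notes on version B (the rewrite author's own statement) =====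
-- stated objective: alternative
-- what changed: Replaces A's split('<p>') followed by a for-loop over the segment list with a cursor-style while loop that never builds the segment list: it repeatedly locates the next '<p>' with str.find, cleans and classifies the slice before it, and advances the remainder.
import Mathlib
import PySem

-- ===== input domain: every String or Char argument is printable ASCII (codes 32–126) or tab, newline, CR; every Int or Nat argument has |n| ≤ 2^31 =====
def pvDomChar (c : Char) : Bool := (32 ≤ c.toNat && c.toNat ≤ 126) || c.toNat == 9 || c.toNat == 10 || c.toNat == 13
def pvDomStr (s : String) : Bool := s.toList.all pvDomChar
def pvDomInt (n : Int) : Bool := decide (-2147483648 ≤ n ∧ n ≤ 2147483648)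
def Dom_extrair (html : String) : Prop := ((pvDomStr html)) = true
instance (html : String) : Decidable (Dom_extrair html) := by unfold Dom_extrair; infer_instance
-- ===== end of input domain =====

-- B replaces A's split('<p>') + for-loop over the segment list by a find-driven cursor loop over
-- the remaining string (objective: alternative). Equivalence is about the return value; on inputs
-- excluded by Pre_ both Pythons raise SystemExit.

-- ===== PORT A =====
def pvSep : List Char := ['<', 'p', '>']
-- lin.replace('</p>', '').strip()  (the cleaning both Pythons perform)
def pvClean (l : List Char) : List Char :=
  PySem.Chars.strip (PySem.Chars.replace l ['<', '/', 'p', '>'] [])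

-- A's loop body: skip empty, skip tags (the Python raises SystemExit there when not continua —
-- outside Pre_), append words
def pvStepA (acc : List String) (lin : List Char) : List String :=
  let lin := pvClean lin
  if lin = [] then acc
  else if PySem.Chars.startswith lin ['<'] then acc
  else acc ++ [String.mk lin]

def extrair (html : String) : List String × Bool :=
  if PySem.Str.isIn "Nenhuma palavra encontrada" html then ([], false)
  else
    ((PySem.Chars.splitOn html.toList pvSep).foldl pvStepA [],
     PySem.Str.isIn "Sua pesquisa retornou mais de 200 linhas" html)

-- ===== PORT B =====
-- Source B's while loop: find the next '<p>', clean and classify the slice before it, advance.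
-- fuel = length + 1 is only a totality guard (each recursive call drops ≥ 3 characters).
def extrairGo : Nat → Bool → List Char → List String → List String
  | 0, _, _, lista => lista
  | fuel + 1, continua, resto, lista =>
    let i := PySem.Chars.find resto pvSep
    let lin := pvClean (if i < 0 then resto else PySem.List.slice resto none (some i))
    let lista' :=
      if lin ≠ [] then
        if PySem.Chars.startswith lin ['<'] then lista
          -- Python raises SystemExit here when ¬ continua (outside Pre_)
        else lista ++ [String.mk lin]
      else lista
    if i < 0 then lista'
    else extrairGo fuel continua (PySem.List.slice resto (some (i + 3)) none) lista'

def extrair_alt (html : String) : List String × Bool :=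
  if PySem.Str.isIn "Nenhuma palavra encontrada" html then ([], false)
  else
    let continua := PySem.Str.isIn "Sua pesquisa retornou mais de 200 linhas" html
    (extrairGo (html.toList.length + 1) continua html.toList [], continua)

-- ===== PRECONDITION & SPEC =====
-- Pre_ excludes exactly the inputs where A (and B) raise SystemExit: no result phrase, no
-- continuation phrase, and some cleaned nonempty segment still starts with '<'.
def Pre_extrair (html : String) : Prop :=
  PySem.Str.isIn "Nenhuma palavra encontrada" html = true ∨
  PySem.Str.isIn "Sua pesquisa retornou mais de 200 linhas" html = true ∨
  ∀ lin ∈ PySem.Chars.splitOn html.toList pvSep,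
    PySem.Chars.startswith (pvClean lin) ['<'] = false
instance (html : String) : Decidable (Pre_extrair html) := by unfold Pre_extrair; infer_instance
def pvWitness_extrair : String := "<p>abc</p><p> def </p>"
def Spec_extrair (html : String) (out : List String × Bool) : Prop := out = extrair_alt html
instance (html : String) (out : List String × Bool) : Decidable (Spec_extrair html out) := by unfold Spec_extrair; infer_instance

-- ===== CLAIM (what is proved, stated in full; the proofs are below) =====
def Claim_equal_extrair : Prop := ∀ (html : String), Dom_extrair html → Pre_extrair html → Spec_extrair html (extrair html)

-- ===== LEMMAS AND PROOFS =====

-- reference splitter: the segments of l between occurrences of '<p>', first occurrence first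
def pvSp : List Char → List (List Char)
  | [] => [[]]
  | c :: rest =>
    if pvSep.isPrefixOf (c :: rest) then [] :: pvSp ((c :: rest).drop 3)
    else
      match pvSp rest with
      | [] => []
      | x :: xs => (c :: x) :: xs
termination_by l => l.length
decreasing_by all_goals (simp; try omega)

theorem pvSp_ne_nil (l : List Char) : pvSp l ≠ [] := by
  induction l using pvSp.induct with
  | case1 => simp [pvSp]
  | case2 c rest h ih => simp [pvSp, h]
  | case3 c rest h heq ih => exact absurd heq ih
  | case4 c rest h x xs heq ih => simp [pvSp, h, heq]

-- splitOn's worker equals the reference splitter modulo the running piece/accumulator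
theorem pvSplitGo_eq (fuel : Nat) (l cur : List Char) (acc : List (List Char))
    (h : l.length ≤ fuel) :
    PySem.Chars.splitOn.go pvSep fuel l cur acc
      = acc.reverse ++
        (match pvSp l with
         | [] => []
         | x :: xs => (cur.reverse ++ x) :: xs) := by
  induction fuel generalizing l cur acc with
  | zero =>
    have hl : l = [] := List.eq_nil_of_length_eq_zero (Nat.le_zero.mp h)
    subst hl
    simp [PySem.Chars.splitOn.go, pvSp]
  | succ fuel ih =>
    cases l with
    | nil => simp [PySem.Chars.splitOn.go, pvSp]
    | cons c rest =>
      by_cases hp : pvSep.isPrefixOf (c :: rest)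
      · have hlen : ((c :: rest).drop pvSep.length).length ≤ fuel := by
          simp [pvSep] at h ⊢; omega
        rw [show PySem.Chars.splitOn.go pvSep (fuel + 1) (c :: rest) cur acc
              = PySem.Chars.splitOn.go pvSep fuel ((c :: rest).drop pvSep.length) []
                  (cur.reverse :: acc) by simp [PySem.Chars.splitOn.go, hp]]
        rw [ih _ _ _ hlen]
        have hsp : pvSp (c :: rest) = [] :: pvSp ((c :: rest).drop 3) := by
          simp [pvSp, hp]
        rw [hsp]
        cases hx : pvSp ((c :: rest).drop 3) with
        | nil => exact absurd hx (pvSp_ne_nil _)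
        | cons y ys =>
          have hx' : pvSp (List.drop 2 rest) = y :: ys := by simpa using hx
          simp [pvSep, hx']
      · have hlen : rest.length ≤ fuel := by simp at h; omega
        rw [show PySem.Chars.splitOn.go pvSep (fuel + 1) (c :: rest) cur acc
              = PySem.Chars.splitOn.go pvSep fuel rest (c :: cur) acc by
            simp [PySem.Chars.splitOn.go, hp]]
        rw [ih _ _ _ hlen]
        have hsp : pvSp (c :: rest)
            = match pvSp rest with
              | [] => []
              | x :: xs => (c :: x) :: xs := by simp [pvSp, hp]
        rw [hsp]
        cases hx : pvSp rest with
        | nil => exact absurd hx (pvSp_ne_nil _)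
        | cons y ys => simp

theorem pvSplitOn_eq_sp (l : List Char) :
    PySem.Chars.splitOn l pvSep = pvSp l := by
  rw [PySem.Chars.splitOn, pvSplitGo_eq _ _ _ _ (Nat.le_succ _)]
  cases hx : pvSp l with
  | nil => exact absurd hx (pvSp_ne_nil _)
  | cons y ys => simp

-- find.go at an arbitrary start index, in terms of find
theorem pvFindGo_shift (l : List Char) : ∀ k : Nat,
    PySem.Chars.find.go pvSep l k
      = if PySem.Chars.find l pvSep = -1 then -1 else PySem.Chars.find l pvSep + k := by
  induction l with
  | nil => intro k; simp [PySem.Chars.find, PySem.Chars.find.go, pvSep]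
  | cons c rest ih =>
    intro k
    by_cases hp : pvSep.isPrefixOf (c :: rest)
    · simp [PySem.Chars.find, PySem.Chars.find.go, hp]
    · have h1 : PySem.Chars.find (c :: rest) pvSep = PySem.Chars.find.go pvSep rest 1 := by
        simp [PySem.Chars.find, PySem.Chars.find.go, hp]
      rw [show PySem.Chars.find.go pvSep (c :: rest) k = PySem.Chars.find.go pvSep rest (k + 1) by
        simp [PySem.Chars.find.go, hp]]
      rw [ih (k + 1), h1, ih 1]
      by_cases hr : PySem.Chars.find rest pvSep = -1
      · simp [hr]
      · have h0 := PySem.Chars.neg_one_le_find rest pvSep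
        simp [hr]
        rw [if_neg (by omega)]
        ring

theorem pvSp_of_find_neg (l : List Char) (h : PySem.Chars.find l pvSep = -1) :
    pvSp l = [l] := by
  induction l with
  | nil => simp [pvSp]
  | cons c rest ih =>
    by_cases hp : pvSep.isPrefixOf (c :: rest)
    · exfalso
      have : PySem.Chars.find (c :: rest) pvSep = 0 := by
        simp [PySem.Chars.find, PySem.Chars.find.go, hp]
      omega
    · have h1 : PySem.Chars.find (c :: rest) pvSep = PySem.Chars.find.go pvSep rest 1 := by
        simp [PySem.Chars.find, PySem.Chars.find.go, hp]
      rw [pvFindGo_shift] at h1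
      have hr : PySem.Chars.find rest pvSep = -1 := by
        by_cases hr' : PySem.Chars.find rest pvSep = -1
        · exact hr'
        · rw [if_neg hr'] at h1
          have := PySem.Chars.neg_one_le_find rest pvSep
          omega
      simp [pvSp, hp, ih hr]

theorem pvSp_of_find_nonneg (l : List Char) (h : 0 ≤ PySem.Chars.find l pvSep) :
    pvSp l = l.take (PySem.Chars.find l pvSep).toNat
        :: pvSp (l.drop ((PySem.Chars.find l pvSep).toNat + 3)) := by
  induction l with
  | nil =>
    exfalso
    have : PySem.Chars.find ([] : List Char) pvSep = -1 := by
      simp [PySem.Chars.find, PySem.Chars.find.go, pvSep]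
    omega
  | cons c rest ih =>
    by_cases hp : pvSep.isPrefixOf (c :: rest)
    · have h0 : PySem.Chars.find (c :: rest) pvSep = 0 := by
        simp [PySem.Chars.find, PySem.Chars.find.go, hp]
      rw [h0]
      simp [pvSp, hp]
    · have h1 : PySem.Chars.find (c :: rest) pvSep = PySem.Chars.find.go pvSep rest 1 := by
        simp [PySem.Chars.find, PySem.Chars.find.go, hp]
      rw [pvFindGo_shift] at h1
      by_cases hr : PySem.Chars.find rest pvSep = -1
      · rw [h1, if_pos hr] at h; omega
      · rw [if_neg hr] at h1
        have hr0 : 0 ≤ PySem.Chars.find rest pvSep := by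
          have := PySem.Chars.neg_one_le_find rest pvSep
          omega
        have htn : (PySem.Chars.find (c :: rest) pvSep).toNat
            = (PySem.Chars.find rest pvSep).toNat + 1 := by omega
        rw [htn]
        have hsp : pvSp (c :: rest)
            = match pvSp rest with
              | [] => []
              | x :: xs => (c :: x) :: xs := by simp [pvSp, hp]
        rw [hsp, ih hr0]
        simp [List.take_succ_cons, List.drop_succ_cons]

-- when '<p>' occurs at position k, the string extends at least k+3 characters
theorem pvFind_len (l : List Char) (h : 0 ≤ PySem.Chars.find l pvSep) :
    (PySem.Chars.find l pvSep).toNat + 3 ≤ l.length := by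
  have hs := (PySem.Chars.find_spec (s := l) (sub := pvSep) h).1
  have h3 : pvSep.length ≤ (l.drop (PySem.Chars.find l pvSep).toNat).length :=
    hs.length_le
  have hle : PySem.Chars.find l pvSep ≤ (l.length : Int) := PySem.Chars.find_le_length l pvSep
  have hps : pvSep.length = 3 := rfl
  rw [hps, List.length_drop] at h3
  omega

-- B's cursor loop computes A's fold over the reference segments
theorem pvGo_eq_foldl (fuel : Nat) :
    ∀ (resto : List Char) (continua : Bool) (lista : List String),
      resto.length < fuel →
      extrairGo fuel continua resto lista = (pvSp resto).foldl pvStepA lista := by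
  induction fuel with
  | zero => intro resto _ _ h; omega
  | succ fuel ih =>
    intro resto continua lista h
    by_cases hneg : PySem.Chars.find resto pvSep < 0
    · have hm1 : PySem.Chars.find resto pvSep = -1 := by
        have := PySem.Chars.neg_one_le_find resto pvSep
        omega
      rw [pvSp_of_find_neg resto hm1]
      have hstep : extrairGo (fuel + 1) continua resto lista = pvStepA lista resto := by
        simp only [extrairGo, hm1, pvStepA]
        norm_num
      rw [hstep, List.foldl_cons, List.foldl_nil]
    · have hpos : 0 ≤ PySem.Chars.find resto pvSep := by omega
      have hlen := pvFind_len resto hpos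
      have hstep : extrairGo (fuel + 1) continua resto lista
          = extrairGo fuel continua
              (PySem.List.slice resto (some (PySem.Chars.find resto pvSep + 3)) none)
              (pvStepA lista (PySem.List.slice resto none (some (PySem.Chars.find resto pvSep)))) := by
        simp only [extrairGo, if_neg hneg, pvStepA]
        by_cases he : pvClean (PySem.List.slice resto none (some (PySem.Chars.find resto pvSep))) = []
        · simp [he]
        · by_cases hst : PySem.Chars.startswith
              (pvClean (PySem.List.slice resto none (some (PySem.Chars.find resto pvSep)))) ['<'] = true
          · simp [he, hst]
          · simp only [Bool.not_eq_true] at hst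
            simp [he, hst]
      have hsl1 : PySem.List.slice resto none (some (PySem.Chars.find resto pvSep))
          = resto.take (PySem.Chars.find resto pvSep).toNat :=
        PySem.List.slice_to resto hpos
      have hsl2 : PySem.List.slice resto (some (PySem.Chars.find resto pvSep + 3)) none
          = resto.drop ((PySem.Chars.find resto pvSep).toNat + 3) := by
        rw [PySem.List.slice_from resto (by omega)]
        congr 1
        omega
      rw [hstep, hsl1, hsl2, pvSp_of_find_nonneg resto hpos, List.foldl_cons]
      exact ih _ continua _ (by simp; omega)

-- ===== VERDICT (by name: the statement is the Claim_ definition above) =====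
theorem extrair_spec : Claim_equal_extrair := by
  intro html _ _
  show extrair html = extrair_alt html
  unfold extrair extrair_alt
  by_cases h1 : PySem.Str.isIn "Nenhuma palavra encontrada" html = true
  · rw [if_pos h1, if_pos h1]
  · rw [if_neg h1, if_neg h1]
    show (_, _) = (extrairGo (html.toList.length + 1)
        (PySem.Str.isIn "Sua pesquisa retornou mais de 200 linhas" html) html.toList [],
      PySem.Str.isIn "Sua pesquisa retornou mais de 200 linhas" html)
    rw [pvGo_eq_foldl _ _ _ _ (Nat.lt_succ_self _), pvSplitOn_eq_sp]
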